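-- pv_equiv track=rewrite | github.com/jcbdelo26/chiefaiofficer-alpha-swarm | execution/instantly_dispatcher.py | _is_excluded_domain
-- ===== SOURCE A (Python) =====
-- def _is_excluded_domain(email_domain: str, excluded_domains: set) -> bool:
--     """
--     Match excluded recipient domains with subdomain awareness.
--     Example: sub.example.com matches excluded example.com.
--     """
--     normalized = (email_domain or "").strip().lower().rstrip(".")
--     if not normalized:
--         return False
--     for excluded in excluded_domains:
--         base = str(excluded or "").strip().lower().rstrip(".")
--         if not base:
--             continue
--         if normalized == base or normalized.endswith(f".{base}"):
--             return True
--     return False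
-- ===== SOURCE B (Python) =====
-- def _is_excluded_domain(email_domain: str, excluded_domains: set) -> bool:
--     """Set-lookup reformulation: normalize the excluded domains into a set once,
--     then peel the email domain label by label and test each dot-suffix for membership."""
--     excluded = set()
--     for e in excluded_domains:
--         base = str(e or "").strip().lower().rstrip(".")
--         if base:
--             excluded.add(base)
--     cand = (email_domain or "").strip().lower().rstrip(".")
--     if not cand:
--         return False
--     while True:
--         if cand in excluded:
--             return True
--         dot = cand.find(".")
--         if dot == -1:
--             return False
--         cand = cand[dot + 1:]
-- ===== Notes on version B (the rewrite author's own statement) =====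
-- stated objective: alternative
-- what changed: A normalizes every excluded entry on each call and compares the email domain against each with ==/endswith; B builds the normalized excluded set once and then peels the email domain label by label, testing each dot-suffix for set membership.
import Mathlib
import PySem

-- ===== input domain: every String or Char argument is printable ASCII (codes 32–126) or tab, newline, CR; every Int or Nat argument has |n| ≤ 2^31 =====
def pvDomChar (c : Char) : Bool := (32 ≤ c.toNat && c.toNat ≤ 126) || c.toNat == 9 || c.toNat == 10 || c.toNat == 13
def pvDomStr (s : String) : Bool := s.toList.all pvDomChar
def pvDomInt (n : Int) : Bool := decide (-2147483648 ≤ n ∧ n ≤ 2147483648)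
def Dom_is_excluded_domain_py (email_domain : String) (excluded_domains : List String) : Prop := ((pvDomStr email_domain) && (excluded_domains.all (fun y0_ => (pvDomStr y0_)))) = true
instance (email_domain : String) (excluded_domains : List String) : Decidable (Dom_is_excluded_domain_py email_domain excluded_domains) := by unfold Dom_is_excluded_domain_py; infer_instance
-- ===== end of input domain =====

-- B replaces A's per-entry scan (normalize every excluded entry, compare ==/endswith) by a
-- normalized set built once plus a label-peeling loop over the email domain's dot-suffixes.

-- hand port of Python's str.rstrip(".") (PySem's rstrip strips whitespace only): drop trailing
-- '.' characters; exact for this single-character strip set.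
def pvRstripDots (s : String) : String := String.ofList ((s.toList.reverse.dropWhile (fun c => c = '.')).reverse)

-- ===== PORT A =====
-- the for-loop over excluded_domains with its early return
def pvALoop (normalized : String) : List String → Bool
  | [] => false
  | excluded :: rest =>
    let base := pvRstripDots (PySem.Str.lower (PySem.Str.strip excluded))
    if base = "" then pvALoop normalized rest
    else if normalized == base || PySem.Str.endswith normalized ("." ++ base) then true
    else pvALoop normalized rest

def is_excluded_domain_py (email_domain : String) (excluded_domains : List String) : Bool :=
  let normalized := pvRstripDots (PySem.Str.lower (PySem.Str.strip email_domain))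
  if normalized = "" then false
  else pvALoop normalized excluded_domains

-- ===== PORT B =====
-- the while-loop of Source B: membership test, then peel past the first '.'
def pvPeelLoop (excluded : PySem.Set String) (cand : List Char) : Bool :=
  if PySem.Set.contains excluded (String.ofList cand) then true
  else if h : PySem.Chars.find cand ['.'] = -1 then false
  else pvPeelLoop excluded (cand.drop ((PySem.Chars.find cand ['.']).toNat + 1))
termination_by cand.length
decreasing_by
  have hinf : ['.'] <:+: cand := (PySem.Chars.find_ne_neg_one_iff cand ['.']).mp h
  have hne : cand ≠ [] := by rintro rfl; simp at hinf
  have hpos : 0 < cand.length := List.length_pos_iff.mpr hne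
  simp only [List.length_drop]
  omega

def is_excluded_domain_py_alt (email_domain : String) (excluded_domains : List String) : Bool :=
  let excluded : PySem.Set String := excluded_domains.foldl
    (fun s e =>
      let base := pvRstripDots (PySem.Str.lower (PySem.Str.strip e))
      if base = "" then s else PySem.Set.add s base)
    PySem.Set.empty
  let cand := pvRstripDots (PySem.Str.lower (PySem.Str.strip email_domain))
  if cand = "" then false
  else pvPeelLoop excluded cand.toList

-- ===== PRECONDITION & SPEC =====
def Spec_is_excluded_domain_py (email_domain : String) (excluded_domains : List String) (out : Bool) : Prop := out = is_excluded_domain_py_alt email_domain excluded_domains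
instance (email_domain : String) (excluded_domains : List String) (out : Bool) : Decidable (Spec_is_excluded_domain_py email_domain excluded_domains out) := by unfold Spec_is_excluded_domain_py; infer_instance

-- ===== CLAIM (what is proved, stated in full; the proofs are below) =====
def Claim_equal_is_excluded_domain_py : Prop := ∀ (email_domain : String) (excluded_domains : List String), Dom_is_excluded_domain_py email_domain excluded_domains → Spec_is_excluded_domain_py email_domain excluded_domains (is_excluded_domain_py email_domain excluded_domains)

-- ===== LEMMAS AND PROOFS =====

-- normalization of one entry, abbreviated for the proofs
def pvNorm (s : String) : String := pvRstripDots (PySem.Str.lower (PySem.Str.strip s))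

theorem pvString_toList_inj {s t : String} (h : s.toList = t.toList) : s = t := by
  have h2 := congrArg String.ofList h
  rwa [String.ofList_toList, String.ofList_toList] at h2

-- A's loop hits exactly the entries whose nonempty normalization equals the domain or is a dotted suffix of it
theorem pvALoop_iff (normalized : String) (l : List String) :
    pvALoop normalized l = true ↔
      ∃ e ∈ l, pvNorm e ≠ "" ∧
        (normalized = pvNorm e ∨ ('.' :: (pvNorm e).toList) <:+ normalized.toList) := by
  induction l with
  | nil => simp [pvALoop]
  | cons x rest ih =>
    have hxe : ("." ++ pvNorm x).toList = '.' :: (pvNorm x).toList := by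
      simp [String.toList_append]
    simp only [pvALoop, pvNorm] at *
    split_ifs with h1 h2
    · simp only [ih]
      constructor
      · rintro ⟨e, he, hne, hc⟩; exact ⟨e, List.mem_cons_of_mem _ he, hne, hc⟩
      · rintro ⟨e, he, hne, hc⟩
        rcases List.mem_cons.mp he with rfl | he
        · exact absurd h1 hne
        · exact ⟨e, he, hne, hc⟩
    · simp only [Bool.or_eq_true, beq_iff_eq, PySem.Str.endswith_eq,
        PySem.Chars.endswith_iff, hxe] at h2
      constructor
      · intro _; exact ⟨x, List.mem_cons_self, h1, h2⟩
      · intro _; rfl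
    · simp only [Bool.or_eq_true, beq_iff_eq, PySem.Str.endswith_eq,
        PySem.Chars.endswith_iff, hxe] at h2
      rw [ih]
      constructor
      · rintro ⟨e, he, hne, hc⟩; exact ⟨e, List.mem_cons_of_mem _ he, hne, hc⟩
      · rintro ⟨e, he, hne, hc⟩
        rcases List.mem_cons.mp he with rfl | he
        · exact absurd hc h2
        · exact ⟨e, he, hne, hc⟩

-- membership in B's normalized set
theorem pvSet_mem_iff (l : List String) (s : PySem.Set String) (x : String) :
    (x ∈ l.foldl (fun s e =>
        if pvRstripDots (PySem.Str.lower (PySem.Str.strip e)) = "" then s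
        else PySem.Set.add s (pvRstripDots (PySem.Str.lower (PySem.Str.strip e)))) s) ↔
      (x ∈ s ∨ ∃ e ∈ l, pvNorm e ≠ "" ∧ pvNorm e = x) := by
  induction l generalizing s with
  | nil => simp
  | cons a rest ih =>
    rw [List.foldl_cons,
      show pvRstripDots (PySem.Str.lower (PySem.Str.strip a)) = pvNorm a from rfl]
    by_cases hb : pvNorm a = ""
    · rw [if_pos hb, ih]
      constructor
      · rintro (hs | ⟨e, he, hne, hv⟩)
        · exact Or.inl hs
        · exact Or.inr ⟨e, List.mem_cons_of_mem _ he, hne, hv⟩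
      · rintro (hs | ⟨e, he, hne, hv⟩)
        · exact Or.inl hs
        · rcases List.mem_cons.mp he with rfl | he
          · exact absurd hb hne
          · exact Or.inr ⟨e, he, hne, hv⟩
    · rw [if_neg hb, ih]
      constructor
      · rintro (hs | ⟨e, he, hne, hv⟩)
        · rcases (PySem.Set.mem_add s (pvNorm a) x).mp hs with hs | hx
          · exact Or.inl hs
          · exact Or.inr ⟨a, List.mem_cons_self, hb, hx.symm⟩
        · exact Or.inr ⟨e, List.mem_cons_of_mem _ he, hne, hv⟩
      · rintro (hs | ⟨e, he, hne, hv⟩)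
        · exact Or.inl ((PySem.Set.mem_add s (pvNorm a) x).mpr (Or.inl hs))
        · rcases List.mem_cons.mp he with rfl | he
          · exact Or.inl ((PySem.Set.mem_add s (pvNorm e) x).mpr (Or.inr hv.symm))
          · exact Or.inr ⟨e, he, hne, hv⟩

-- peeling past the FIRST dot (at index d) preserves the set of dotted suffixes
theorem pvDotSuffix_peel (cand : List Char) (d : Nat)
    (hpre : ['.'] <+: cand.drop d)
    (hmin : ∀ i < d, ¬ ['.'] <+: cand.drop i) (b : List Char) :
    ('.' :: b) <:+ cand ↔ (b = cand.drop (d + 1) ∨ ('.' :: b) <:+ cand.drop (d + 1)) := by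
  have hdlt : d < cand.length := by
    by_contra hge
    have : cand.drop d = [] := List.drop_eq_nil_of_le (by omega)
    rw [this] at hpre
    exact absurd (List.prefix_nil.mp hpre) (by simp)
  have hdot : cand[d] = '.' := by
    have h1 : cand.drop d = cand[d] :: cand.drop (d + 1) := List.drop_eq_getElem_cons hdlt
    rw [h1, List.cons_prefix_cons] at hpre
    exact hpre.1.symm
  have hdropd : cand.drop d = '.' :: cand.drop (d + 1) := by
    rw [List.drop_eq_getElem_cons hdlt, hdot]
  constructor
  · rintro ⟨p, hp⟩
    have hdropp : cand.drop p.length = '.' :: b := by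
      rw [← hp, List.drop_left]
    have hge : d ≤ p.length := by
      by_contra hlt
      exact hmin p.length (by omega) (by rw [hdropp]; exact ⟨b, rfl⟩)
    rcases Nat.eq_or_lt_of_le hge with heq | hlt
    · left
      rw [← heq, hdropd] at hdropp
      exact (List.cons.injEq _ _ _ _ ▸ hdropp.symm).2
    · right
      have : cand.drop p.length = (cand.drop (d + 1)).drop (p.length - (d + 1)) := by
        rw [List.drop_drop]
        congr 1
        omega
      rw [this] at hdropp
      rw [← hdropp]
      exact List.drop_suffix _ _
  · rintro (rfl | hsuf)
    · rw [← hdropd]; exact List.drop_suffix _ _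
    · exact hsuf.trans (List.drop_suffix _ _)

-- B's loop finds exactly the dotted suffixes (or the domain itself) that lie in the set
theorem pvPeelLoop_iff (excluded : PySem.Set String) (cand : List Char) :
    pvPeelLoop excluded cand = true ↔
      ∃ b : List Char, (b = cand ∨ ('.' :: b) <:+ cand) ∧ String.ofList b ∈ excluded := by
  fun_induction pvPeelLoop excluded cand with
  | case1 cand hmem =>
    simp only [PySem.Set.contains] at hmem
    exact iff_of_true rfl ⟨cand, Or.inl rfl, by simpa using hmem⟩
  | case2 cand hmem hfind =>
    simp only [PySem.Set.contains] at hmem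
    simp only [Bool.false_eq_true, false_iff]
    rintro ⟨b, hb | hb, hbmem⟩
    · subst hb; exact (by simpa using hmem : String.ofList b ∉ excluded) hbmem
    · obtain ⟨p, hp⟩ := hb
      have hinf : ['.'] <:+: cand := ⟨p, b, by rw [← hp]; simp⟩
      exact (PySem.Chars.find_ne_neg_one_iff cand ['.']).mpr hinf hfind
  | case3 cand hmem hfind ih =>
    simp only [PySem.Set.contains] at hmem
    have h0 : 0 ≤ PySem.Chars.find cand ['.'] := by
      have := PySem.Chars.neg_one_le_find cand ['.']
      omega
    obtain ⟨hpre, hmin⟩ := PySem.Chars.find_spec h0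
    rw [ih]
    constructor
    · rintro ⟨b, hb, hbmem⟩
      refine ⟨b, Or.inr ?_, hbmem⟩
      exact (pvDotSuffix_peel cand _ hpre hmin b).mpr hb
    · rintro ⟨b, hb | hb, hbmem⟩
      · subst hb; exact absurd hbmem (by simpa using hmem)
      · exact ⟨b, (pvDotSuffix_peel cand _ hpre hmin b).mp hb, hbmem⟩

-- ===== VERDICT (by name: the statement is the Claim_ definition above) =====
theorem is_excluded_domain_py_spec : Claim_equal_is_excluded_domain_py := by
  intro email_domain excluded_domains _
  show is_excluded_domain_py email_domain excluded_domains
      = is_excluded_domain_py_alt email_domain excluded_domains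
  show (if pvRstripDots (PySem.Str.lower (PySem.Str.strip email_domain)) = "" then false
        else pvALoop (pvRstripDots (PySem.Str.lower (PySem.Str.strip email_domain))) excluded_domains)
      = (if pvRstripDots (PySem.Str.lower (PySem.Str.strip email_domain)) = "" then false
        else pvPeelLoop
          (excluded_domains.foldl (fun s e =>
              if pvRstripDots (PySem.Str.lower (PySem.Str.strip e)) = "" then s
              else PySem.Set.add s (pvRstripDots (PySem.Str.lower (PySem.Str.strip e)))) PySem.Set.empty)
          (pvRstripDots (PySem.Str.lower (PySem.Str.strip email_domain))).toList)
  generalize pvRstripDots (PySem.Str.lower (PySem.Str.strip email_domain)) = normalized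
  by_cases hn : normalized = ""
  · rw [if_pos hn, if_pos hn]
  · rw [if_neg hn, if_neg hn, Bool.eq_iff_iff, pvALoop_iff, pvPeelLoop_iff]
    constructor
    · rintro ⟨e, he, hne, hc⟩
      refine ⟨(pvNorm e).toList, ?_, ?_⟩
      · rcases hc with hc | hc
        · exact Or.inl (by rw [hc])
        · exact Or.inr hc
      · rw [String.ofList_toList, pvSet_mem_iff]
        exact Or.inr ⟨e, he, hne, rfl⟩
    · rintro ⟨b, hb, hbmem⟩
      rw [pvSet_mem_iff] at hbmem
      rcases hbmem with hbmem | ⟨e, he, hne, hv⟩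
      · simp [PySem.Set.empty] at hbmem
      · have hbl : (pvNorm e).toList = b := by rw [hv, String.toList_ofList]
        refine ⟨e, he, hne, ?_⟩
        rcases hb with hb | hb
        · rw [hb] at hbl
          exact Or.inl (pvString_toList_inj hbl).symm
        · rw [hbl]
          exact Or.inr hb
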